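-- pv_equiv track=rewrite | github.com/lixc123/web_analyzer | backend/utils/analyzer.py | _detect_charset
-- ===== SOURCE A (Python) =====
-- from typing import List, Optional
--
-- def _detect_charset(value: str) -> Optional[str]:
--     """简单检测字符串的字符集类型。"""
--
--     if not value:
--         return None
--
--     hex_chars = set("0123456789abcdefABCDEF")
--     if all(c in hex_chars for c in value):
--         return "hex"
--
--     base64_chars = set("ABCDEFGHIJKLMNOPQRSTUVWXYZabcdefghijklmnopqrstuvwxyz0123456789+/=")
--     if all(c in base64_chars for c in value):
--         return "base64"
--
--     return None
-- ===== SOURCE B (Python) =====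
-- from typing import Optional
--
-- _LEVELS = ("hex", "base64", None)
--
-- def _char_level(c: str) -> int:
--     """0 if c is a hex digit, 1 if a (non-hex) base64 character, 2 otherwise."""
--     if c in "0123456789abcdefABCDEF":
--         return 0
--     if c in "ABCDEFGHIJKLMNOPQRSTUVWXYZabcdefghijklmnopqrstuvwxyz0123456789+/=":
--         return 1
--     return 2
--
-- def _detect_charset(value: str) -> Optional[str]:
--     """Max character-severity level over the string indexes a result table.
--     Works because the hex charset is a subset of the base64 charset."""
--     if not value:
--         return None
--     return _LEVELS[max(_char_level(c) for c in value)]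
-- ===== Notes on version B (the rewrite author's own statement) =====
-- stated objective: alternative
-- what changed: B replaces A's staged all()-scans and if-chain by a lattice-join: each character is mapped to a severity level (0=hex, 1=base64-only, 2=other), the maximum level over the string is taken in one pass, and the answer is a table lookup by that level (correct since the hex charset is a subset of the base64 charset).
import Mathlib
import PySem

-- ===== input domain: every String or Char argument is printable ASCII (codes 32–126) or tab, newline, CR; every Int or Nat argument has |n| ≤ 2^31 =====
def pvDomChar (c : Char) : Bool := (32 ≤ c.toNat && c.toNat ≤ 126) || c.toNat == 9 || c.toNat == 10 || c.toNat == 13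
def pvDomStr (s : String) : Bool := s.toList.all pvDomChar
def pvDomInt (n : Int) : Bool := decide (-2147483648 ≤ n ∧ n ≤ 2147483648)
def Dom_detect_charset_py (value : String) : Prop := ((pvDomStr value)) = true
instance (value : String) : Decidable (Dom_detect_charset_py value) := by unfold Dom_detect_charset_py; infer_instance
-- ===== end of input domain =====

-- B replaces A's staged all()-scans and if-chain by a lattice join: each character is mapped
-- to a severity level (0=hex, 1=base64-only, 2=other), the max level over the string is taken
-- in one pass, and the answer is a table lookup by that level (hex charset ⊆ base64 charset).

-- ===== PORT A =====
-- A's hex_chars / base64_chars sets, as lists of their distinct characters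
def hexChars : List Char := "0123456789abcdefABCDEF".toList
def base64Chars : List Char := "ABCDEFGHIJKLMNOPQRSTUVWXYZabcdefghijklmnopqrstuvwxyz0123456789+/=".toList

def detect_charset_py (value : String) : Option String :=
  if value.toList = [] then none
  else if value.toList.all (fun c => hexChars.contains c) then some "hex"
  else if value.toList.all (fun c => base64Chars.contains c) then some "base64"
  else none

-- ===== PORT B =====
-- the _LEVELS result table
def levelsTable : List (Option String) := [some "hex", some "base64", none]

def charLevel (c : Char) : Nat :=
  if "0123456789abcdefABCDEF".toList.contains c then 0
  else if "ABCDEFGHIJKLMNOPQRSTUVWXYZabcdefghijklmnopqrstuvwxyz0123456789+/=".toList.contains c then 1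
  else 2

def detect_charset_py_alt (value : String) : Option String :=
  if value.toList = [] then none
  else
    -- max over the generator, folded left over the characters; tuple indexing:
    -- the level is always < 3 so the in-range getD equals Python's _LEVELS[level]
    levelsTable.getD (value.toList.foldl (fun m c => max m (charLevel c)) 0) none

-- ===== PRECONDITION & SPEC =====
def Spec_detect_charset_py (value : String) (out : Option String) : Prop := out = detect_charset_py_alt value
instance (value : String) (out : Option String) : Decidable (Spec_detect_charset_py value out) := by unfold Spec_detect_charset_py; infer_instance

-- ===== CLAIM (what is proved, stated in full; the proofs are below) =====
def Claim_equal_detect_charset_py : Prop := ∀ (value : String), Dom_detect_charset_py value → Spec_detect_charset_py value (detect_charset_py value)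

-- ===== LEMMAS AND PROOFS =====

theorem foldl_max_le (l : List Char) (a n : Nat) :
    l.foldl (fun m c => max m (charLevel c)) a ≤ n ↔ a ≤ n ∧ ∀ c ∈ l, charLevel c ≤ n := by
  induction l generalizing a with
  | nil => simp
  | cons x xs ih =>
    simp only [List.foldl_cons, ih, max_le_iff, List.mem_cons]
    constructor
    · rintro ⟨⟨ha, hx⟩, hall⟩
      exact ⟨ha, fun c hc => hc.elim (fun h => h ▸ hx) (hall c)⟩
    · rintro ⟨ha, hall⟩
      exact ⟨⟨ha, hall x (Or.inl rfl)⟩, fun c hc => hall c (Or.inr hc)⟩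

theorem level_zero (c : Char) : charLevel c ≤ 0 ↔ hexChars.contains c = true := by
  unfold charLevel hexChars
  split_ifs with h1 h2 <;> simp_all

theorem hex_subset_b64 (c : Char) (h : hexChars.contains c = true) :
    base64Chars.contains c = true := by
  have : hexChars.all (fun c => base64Chars.contains c) = true := by decide
  rw [List.all_eq_true] at this
  exact this c (by simpa using h)

theorem level_one (c : Char) : charLevel c ≤ 1 ↔ base64Chars.contains c = true := by
  unfold charLevel
  split_ifs with h1 h2
  · exact iff_of_true (by omega) (hex_subset_b64 c h1)
  · exact iff_of_true (by omega) h2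
  · exact iff_of_false (by omega) h2

theorem level_two (c : Char) : charLevel c ≤ 2 := by
  unfold charLevel; split_ifs <;> omega

-- ===== VERDICT (by name: the statement is the Claim_ definition above) =====
theorem detect_charset_py_spec : Claim_equal_detect_charset_py := by
  intro value _
  unfold Spec_detect_charset_py detect_charset_py detect_charset_py_alt
  by_cases hnil : value.toList = []
  · simp [hnil]
  · simp only [if_neg hnil]
    set M := value.toList.foldl (fun m c => max m (charLevel c)) 0 with hM
    by_cases hhex : value.toList.all (fun c => hexChars.contains c) = true
    · have : M ≤ 0 := by
        rw [hM, foldl_max_le]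
        exact ⟨le_refl 0, fun c hc => (level_zero c).2 ((List.all_eq_true.1 hhex) c hc)⟩
      have hM0 : M = 0 := Nat.le_zero.1 this
      rw [if_pos hhex, hM0]; rfl
    · by_cases hb64 : value.toList.all (fun c => base64Chars.contains c) = true
      · have h1 : M ≤ 1 := by
          rw [hM, foldl_max_le]
          exact ⟨by omega, fun c hc => (level_one c).2 ((List.all_eq_true.1 hb64) c hc)⟩
        have h0 : ¬ M ≤ 0 := by
          intro h
          rw [hM, foldl_max_le] at h
          exact hhex (List.all_eq_true.2 fun c hc => (level_zero c).1 (h.2 c hc))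
        have hM1 : M = 1 := by omega
        rw [if_neg hhex, if_pos hb64, hM1]; rfl
      · have h2 : M ≤ 2 := by
          rw [hM, foldl_max_le]
          exact ⟨by omega, fun c _ => level_two c⟩
        have h1 : ¬ M ≤ 1 := by
          intro h
          rw [hM, foldl_max_le] at h
          exact hb64 (List.all_eq_true.2 fun c hc => (level_one c).1 (h.2 c hc))
        have hM2 : M = 2 := by omega
        rw [if_neg hhex, if_neg hb64, hM2]; rfl
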